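-- pv_equiv track=rewrite | github.com/Astery0502/simesh | src/simesh/src_old/morton_amr.py | interleave_bits
-- ===== SOURCE A (Python) =====
-- from typing import Iterable
--
-- def interleave_bits(ign:Iterable):
--     answer = 0
--     ndim = len(ign)
--     for i in range(0,64//ndim):
--
--         if ndim == 1:
--             return ign[0]
--
--         elif ndim == 2:
--             bit_x = (ign[0] >> i) & 1
--             bit_y = (ign[1] >> i) & 1
--
--             answer |= (bit_x << (2*i)) | (bit_y << (2*i + 1))
--
--         elif ndim == 3:
--             bit_x = (ign[0] >> i) & 1
--             bit_y = (ign[1] >> i) & 1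
--             bit_z = (ign[2] >> i) & 1
--
--             answer |= (bit_x << (3*i)) | (bit_y << (3*i + 1)) | (bit_z << (3*i + 2))
--
--     return answer
-- ===== SOURCE B (Python) =====
-- def _morton(coords, nbits):
--     if nbits == 0:
--         return 0
--     low = 0
--     for j, c in enumerate(coords):
--         low |= (c & 1) << j
--     return low | (_morton([c >> 1 for c in coords], nbits - 1) << len(coords))
--
-- def interleave_bits(ign):
--     ndim = len(ign)
--     if ndim == 1:
--         return ign[0]
--     if ndim == 2:
--         return _morton(ign, 32)
--     if ndim == 3:
--         return _morton(ign, 21)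
--     return 0
-- ===== Notes on version B (the rewrite author's own statement) =====
-- stated objective: simpler
-- what changed: A's 64//ndim-iteration indexed loop with duplicated per-dimension branches is replaced by one generic recursion that peels the lowest bit of every coordinate at once and shifts the recursive result left by ndim, so the 1D/2D/3D cases share a single _morton helper.
import Mathlib
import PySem

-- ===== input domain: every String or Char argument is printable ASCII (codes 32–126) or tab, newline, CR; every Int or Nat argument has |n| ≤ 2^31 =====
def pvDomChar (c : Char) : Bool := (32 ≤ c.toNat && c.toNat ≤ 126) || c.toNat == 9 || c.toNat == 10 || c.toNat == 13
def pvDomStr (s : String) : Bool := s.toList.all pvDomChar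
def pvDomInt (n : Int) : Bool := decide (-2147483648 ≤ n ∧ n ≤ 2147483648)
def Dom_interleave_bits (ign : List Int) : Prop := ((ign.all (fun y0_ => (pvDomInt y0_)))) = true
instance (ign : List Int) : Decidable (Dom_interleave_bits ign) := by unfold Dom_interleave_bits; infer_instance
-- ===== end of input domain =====

-- B replaces A's per-dimension indexed 64//ndim-iteration loop by one generic recursion that
-- peels the lowest bit of every coordinate at once (simpler: no duplicated 2D/3D branches).

-- ===== PORT A =====
def interleave_bits_go (ign : List Int) (ndim : Int) : List Int → Int → Int
  | [], answer => answer
  | i :: is, answer =>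
    if ndim = 1 then (PySem.List.pyGet? ign 0).getD 0
    else if ndim = 2 then
      let bit_x := PySem.Int.band ((PySem.List.pyGet? ign 0).getD 0 >>> i.toNat) 1
      let bit_y := PySem.Int.band ((PySem.List.pyGet? ign 1).getD 0 >>> i.toNat) 1
      interleave_bits_go ign ndim is
        (PySem.Int.bor answer (PySem.Int.bor (bit_x <<< (2*i).toNat) (bit_y <<< (2*i+1).toNat)))
    else if ndim = 3 then
      let bit_x := PySem.Int.band ((PySem.List.pyGet? ign 0).getD 0 >>> i.toNat) 1
      let bit_y := PySem.Int.band ((PySem.List.pyGet? ign 1).getD 0 >>> i.toNat) 1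
      let bit_z := PySem.Int.band ((PySem.List.pyGet? ign 2).getD 0 >>> i.toNat) 1
      interleave_bits_go ign ndim is
        (PySem.Int.bor answer (PySem.Int.bor (PySem.Int.bor (bit_x <<< (3*i).toNat)
          (bit_y <<< (3*i+1).toNat)) (bit_z <<< (3*i+2).toNat)))
    else interleave_bits_go ign ndim is answer

def interleave_bits (ign : List Int) : Int :=
  -- on [] Python raises ZeroDivisionError at 64//ndim; Pre_ excludes it
  if PySem.List.len ign = 0 then 0
  else interleave_bits_go ign (PySem.List.len ign)
        (PySem.List.pyRange 0 (PySem.Int.floordiv 64 (PySem.List.len ign))) 0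

-- ===== PORT B =====
def mortonLow (coords : List Int) : Int :=
  (PySem.List.enumerate coords).foldl
    (fun low jc => PySem.Int.bor low ((PySem.Int.band jc.2 1) <<< jc.1.toNat)) 0

def morton (coords : List Int) : Nat → Int
  | 0 => 0
  | n+1 => PySem.Int.bor (mortonLow coords)
      ((morton (coords.map (fun (c : Int) => c >>> (1:Nat))) n) <<< coords.length)

def interleave_bits_alt (ign : List Int) : Int :=
  if ign.length = 1 then (PySem.List.pyGet? ign 0).getD 0
  else if ign.length = 2 then morton ign 32
  else if ign.length = 3 then morton ign 21
  else 0

-- ===== PRECONDITION & SPEC =====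
-- Pre_ excludes only the empty list, on which A raises ZeroDivisionError (64//0).
def Pre_interleave_bits (ign : List Int) : Prop := ign ≠ []
instance (ign : List Int) : Decidable (Pre_interleave_bits ign) := by unfold Pre_interleave_bits; infer_instance
def pvWitness_interleave_bits : List Int := [3, 5]

def Spec_interleave_bits (ign : List Int) (out : Int) : Prop := out = interleave_bits_alt ign
instance (ign : List Int) (out : Int) : Decidable (Spec_interleave_bits ign out) := by unfold Spec_interleave_bits; infer_instance

-- ===== CLAIM (what is proved, stated in full; the proofs are below) =====
def Claim_equal_interleave_bits : Prop := ∀ (ign : List Int), Dom_interleave_bits ign → Pre_interleave_bits ign → Spec_interleave_bits ign (interleave_bits ign)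

-- ===== LEMMAS AND PROOFS =====

-- bit i of x, as Python's (x >> i) & 1 (a Nat: that value is nonnegative)
def bitN (x : Int) (i : Nat) : Nat := (PySem.Int.band (x >>> i) 1).toNat

lemma band_one_nonneg (a : Int) : 0 ≤ PySem.Int.band a 1 := by
  rw [PySem.Int.band_comm]; exact PySem.Int.band_nonneg_of_nonneg_left a (by norm_num)

lemma bitN_cast (x : Int) (i : Nat) : ((bitN x i : Nat) : Int) = PySem.Int.band (x >>> i) 1 := by
  unfold bitN; exact Int.toNat_of_nonneg (band_one_nonneg _)

lemma bitN_zero (x : Int) : ((bitN x 0 : Nat) : Int) = PySem.Int.band x 1 := by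
  rw [bitN_cast]; norm_num

lemma bitN_succ (x : Int) (i : Nat) : bitN x (i+1) = bitN (x >>> (1:Nat)) i := by
  unfold bitN; rw [← Int.shiftRight_add, Nat.add_comm]

lemma natCast_shiftLeft (m k : Nat) : ((m : Int) <<< k) = ((m <<< k : Nat) : Int) :=
  Int.mem_toNat?.mp rfl

-- Nat-level value of an or-accumulating loop over range n
def orFold (g : Nat → Nat) (n : Nat) : Nat :=
  (List.range n).foldl (fun a i => a ||| g i) 0

lemma foldl_or_acc (g : Nat → Nat) : ∀ (l : List Nat) (a : Nat),
    l.foldl (fun acc i => acc ||| g i) a = a ||| l.foldl (fun acc i => acc ||| g i) 0 := by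
  intro l
  induction l with
  | nil => intro a; simp
  | cons i is ih =>
    intro a; simp only [List.foldl_cons]
    rw [ih (a ||| g i), ih (0 ||| g i)]
    simp [Nat.lor_assoc]

lemma foldl_or_shiftl (g : Nat → Nat) (k : Nat) : ∀ (l : List Nat) (a : Nat),
    l.foldl (fun acc i => acc ||| (g i <<< k)) (a <<< k) =
      (l.foldl (fun acc i => acc ||| g i) a) <<< k := by
  intro l
  induction l with
  | nil => intro a; simp
  | cons i is ih =>
    intro a; simp only [List.foldl_cons]
    rw [← Nat.shiftLeft_or_distrib, ih]

lemma orFold_succ (g : Nat → Nat) (n : Nat) :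
    orFold g (n+1) = g 0 ||| orFold (fun i => g (i+1)) n := by
  unfold orFold
  rw [List.range_succ_eq_map, List.foldl_cons, List.foldl_map, foldl_or_acc]
  simp [Nat.succ_eq_add_one]

lemma orFold_shiftl (g : Nat → Nat) (k n : Nat) :
    orFold (fun i => g i <<< k) n = orFold g n <<< k := by
  unfold orFold
  have h0 : (0:Nat) = 0 <<< k := by simp
  rw [h0, foldl_or_shiftl]
  simp

-- ---------- 2D ----------

def A2 (x y : Int) (n : Nat) : Nat :=
  orFold (fun i => bitN x i <<< (2*i) ||| bitN y i <<< (2*i+1)) n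

def M2 (x y : Int) : Nat → Nat
  | 0 => 0
  | n+1 => (bitN x 0 ||| bitN y 0 <<< 1) ||| M2 (x >>> (1:Nat)) (y >>> (1:Nat)) n <<< 2

lemma goA2 (x y : Int) : ∀ (is : List Nat) (a : Nat),
    interleave_bits_go [x, y] 2 (is.map (fun (j : Nat) => (j : Int))) ((a : Nat) : Int) =
      ((is.foldl (fun acc i => acc ||| (bitN x i <<< (2*i) ||| bitN y i <<< (2*i+1))) a : Nat) : Int) := by
  intro is
  induction is with
  | nil => intro a; simp [interleave_bits_go]
  | cons j js ih =>
    intro a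
    rw [List.map_cons, interleave_bits_go]
    rw [if_neg (by norm_num), if_pos rfl]
    have h2a : ((2*(j:Int))).toNat = 2*j := by omega
    have h2b : ((2*(j:Int))+1).toNat = 2*j+1 := by omega
    have hj : ((j:Int)).toNat = j := by omega
    simp only [PySem.List.pyGet?_zero_cons, Option.getD_some, h2a, h2b, hj,
      show PySem.List.pyGet? [x,y] 1 = some y by simp [PySem.List.pyGet?, PySem.List.pyIdx?]]
    rw [← bitN_cast x j, ← bitN_cast y j, natCast_shiftLeft, natCast_shiftLeft,
      PySem.Int.bor_natCast, PySem.Int.bor_natCast, List.foldl_cons]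
    exact ih _

lemma morton2_cast (n : Nat) : ∀ (x y : Int), morton [x, y] n = ((M2 x y n : Nat) : Int) := by
  induction n with
  | zero => intro x y; simp [morton, M2]
  | succ n ih =>
    intro x y
    have hlow : mortonLow [x, y] = ((bitN x 0 ||| bitN y 0 <<< 1 : Nat) : Int) := by
      simp only [mortonLow, show PySem.List.enumerate [x,y] = [(0,x),(1,y)] by simp [PySem.List.enumerate],
        List.foldl_cons, List.foldl_nil, Int.toNat_zero, Int.toNat_one]
      rw [← bitN_zero x, ← bitN_zero y, Int.shiftLeft_natCast, Int.shiftLeft_natCast]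
      rw [show PySem.Int.bor 0 (((bitN x 0 <<< 0 : Nat) : Int)) = ((bitN x 0 <<< 0 : Nat) : Int) from by
        rw [PySem.Int.bor_comm]; simp]
      rw [PySem.Int.bor_natCast]
      simp
    simp only [morton, M2, List.map_cons, List.map_nil, List.length_cons, List.length_nil, ih, hlow]
    rw [natCast_shiftLeft, PySem.Int.bor_natCast]

lemma A2_eq_M2 (n : Nat) : ∀ (x y : Int), A2 x y n = M2 x y n := by
  induction n with
  | zero => intro x y; rfl
  | succ n ih =>
    intro x y
    unfold A2
    rw [orFold_succ]
    have hfun : (fun i => bitN x (i+1) <<< (2*(i+1)) ||| bitN y (i+1) <<< (2*(i+1)+1)) =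
        (fun i => (bitN (x >>> (1:Nat)) i <<< (2*i) ||| bitN (y >>> (1:Nat)) i <<< (2*i+1)) <<< 2) := by
      funext i
      rw [bitN_succ, bitN_succ, Nat.shiftLeft_or_distrib]
      rw [show 2*(i+1)+1 = (2*i+1) + 2 from by ring, show 2*(i+1) = 2*i + 2 from by ring]
      simp only [Nat.shiftLeft_add]
    rw [hfun, orFold_shiftl]
    show _ ||| A2 (x >>> (1:Nat)) (y >>> (1:Nat)) n <<< 2 = M2 x y (n+1)
    rw [ih]
    simp [M2]

-- ---------- 3D ----------

def A3 (x y z : Int) (n : Nat) : Nat :=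
  orFold (fun i => (bitN x i <<< (3*i) ||| bitN y i <<< (3*i+1)) ||| bitN z i <<< (3*i+2)) n

def M3 (x y z : Int) : Nat → Nat
  | 0 => 0
  | n+1 => ((bitN x 0 ||| bitN y 0 <<< 1) ||| bitN z 0 <<< 2) |||
      M3 (x >>> (1:Nat)) (y >>> (1:Nat)) (z >>> (1:Nat)) n <<< 3

lemma goA3 (x y z : Int) : ∀ (is : List Nat) (a : Nat),
    interleave_bits_go [x, y, z] 3 (is.map (fun (j : Nat) => (j : Int))) ((a : Nat) : Int) =
      ((is.foldl (fun acc i => acc ||| ((bitN x i <<< (3*i) ||| bitN y i <<< (3*i+1)) ||| bitN z i <<< (3*i+2))) a : Nat) : Int) := by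
  intro is
  induction is with
  | nil => intro a; simp [interleave_bits_go]
  | cons j js ih =>
    intro a
    rw [List.map_cons, interleave_bits_go]
    rw [if_neg (by norm_num), if_neg (by norm_num), if_pos rfl]
    have h3a : ((3*(j:Int))).toNat = 3*j := by omega
    have h3b : ((3*(j:Int))+1).toNat = 3*j+1 := by omega
    have h3c : ((3*(j:Int))+2).toNat = 3*j+2 := by omega
    have hj : ((j:Int)).toNat = j := by omega
    simp only [PySem.List.pyGet?_zero_cons, Option.getD_some, h3a, h3b, h3c, hj,
      show PySem.List.pyGet? [x,y,z] 1 = some y by simp [PySem.List.pyGet?, PySem.List.pyIdx?],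
      show PySem.List.pyGet? [x,y,z] 2 = some z by simp [PySem.List.pyGet?, PySem.List.pyIdx?]]
    rw [← bitN_cast x j, ← bitN_cast y j, ← bitN_cast z j,
      natCast_shiftLeft, natCast_shiftLeft, natCast_shiftLeft,
      PySem.Int.bor_natCast, PySem.Int.bor_natCast, PySem.Int.bor_natCast, List.foldl_cons]
    exact ih _

lemma morton3_cast (n : Nat) : ∀ (x y z : Int),
    morton [x, y, z] n = ((M3 x y z n : Nat) : Int) := by
  induction n with
  | zero => intro x y z; simp [morton, M3]
  | succ n ih =>
    intro x y z
    have hlow : mortonLow [x, y, z] = (((bitN x 0 ||| bitN y 0 <<< 1) ||| bitN z 0 <<< 2 : Nat) : Int) := by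
      simp only [mortonLow, show PySem.List.enumerate [x,y,z] = [(0,x),(1,y),(2,z)] by simp [PySem.List.enumerate],
        List.foldl_cons, List.foldl_nil, Int.toNat_zero, Int.toNat_one, show Int.toNat 2 = 2 from rfl]
      rw [← bitN_zero x, ← bitN_zero y, ← bitN_zero z, Int.shiftLeft_natCast, Int.shiftLeft_natCast, Int.shiftLeft_natCast]
      rw [show PySem.Int.bor 0 (((bitN x 0 <<< 0 : Nat) : Int)) = ((bitN x 0 <<< 0 : Nat) : Int) from by
        rw [PySem.Int.bor_comm]; simp]
      rw [PySem.Int.bor_natCast, PySem.Int.bor_natCast]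
      simp
    simp only [morton, M3, List.map_cons, List.map_nil, List.length_cons, List.length_nil, ih, hlow]
    rw [natCast_shiftLeft, PySem.Int.bor_natCast]

lemma A3_eq_M3 (n : Nat) : ∀ (x y z : Int), A3 x y z n = M3 x y z n := by
  induction n with
  | zero => intro x y z; rfl
  | succ n ih =>
    intro x y z
    unfold A3
    rw [orFold_succ]
    have hfun : (fun i => (bitN x (i+1) <<< (3*(i+1)) ||| bitN y (i+1) <<< (3*(i+1)+1)) ||| bitN z (i+1) <<< (3*(i+1)+2)) =
        (fun i => ((bitN (x >>> (1:Nat)) i <<< (3*i) ||| bitN (y >>> (1:Nat)) i <<< (3*i+1)) ||| bitN (z >>> (1:Nat)) i <<< (3*i+2)) <<< 3) := by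
      funext i
      rw [bitN_succ, bitN_succ, bitN_succ, Nat.shiftLeft_or_distrib, Nat.shiftLeft_or_distrib]
      rw [show 3*(i+1)+2 = (3*i+2) + 3 from by ring, show 3*(i+1)+1 = (3*i+1) + 3 from by ring,
        show 3*(i+1) = 3*i + 3 from by ring]
      simp only [Nat.shiftLeft_add]
    rw [hfun, orFold_shiftl]
    show _ ||| A3 (x >>> (1:Nat)) (y >>> (1:Nat)) (z >>> (1:Nat)) n <<< 3 = M3 x y z (n+1)
    rw [ih]
    simp [M3]

-- ---------- ndim ∉ {1,2,3} ----------

lemma go_nop (ign : List Int) (ndim : Int) (h1 : ndim ≠ 1) (h2 : ndim ≠ 2) (h3 : ndim ≠ 3) :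
    ∀ (is : List Int) (a : Int), interleave_bits_go ign ndim is a = a := by
  intro is
  induction is with
  | nil => intro a; rfl
  | cons i is ih => intro a; simp [interleave_bits_go, h1, h2, h3, ih]

-- ===== VERDICT (by name: the statement is the Claim_ definition above) =====
theorem interleave_bits_spec : Claim_equal_interleave_bits := by
  unfold Claim_equal_interleave_bits
  intro ign _ hpre
  unfold Spec_interleave_bits
  match ign with
  | [] => exact absurd rfl hpre
  | [x] =>
    show interleave_bits [x] = interleave_bits_alt [x]
    have hlen : PySem.List.len [x] = 1 := by simp [PySem.List.len_eq]
    rw [interleave_bits, interleave_bits_alt, hlen]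
    rw [if_neg (by norm_num), if_pos (by norm_num)]
    rw [show PySem.Int.floordiv 64 1 = 64 from by decide]
    rw [PySem.List.pyRange_one_cons (by norm_num), interleave_bits_go, if_pos rfl]
  | [x, y] =>
    show interleave_bits [x, y] = interleave_bits_alt [x, y]
    have hlen : PySem.List.len [x, y] = 2 := by simp [PySem.List.len_eq]
    rw [interleave_bits, interleave_bits_alt, hlen]
    rw [if_neg (by norm_num), if_neg (by norm_num), if_pos (by norm_num)]
    rw [show PySem.Int.floordiv 64 2 = ((32:Nat) : Int) from by decide,
        PySem.List.pyRange_zero_natCast]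
    have h := goA2 x y (List.range 32) 0
    rw [Nat.cast_zero] at h
    rw [h]
    show ((A2 x y 32 : Nat) : Int) = morton [x, y] 32
    rw [A2_eq_M2, morton2_cast]
  | [x, y, z] =>
    show interleave_bits [x, y, z] = interleave_bits_alt [x, y, z]
    have hlen : PySem.List.len [x, y, z] = 3 := by simp [PySem.List.len_eq]
    rw [interleave_bits, interleave_bits_alt, hlen]
    rw [if_neg (by norm_num), if_neg (by norm_num), if_neg (by norm_num), if_pos (by norm_num)]
    rw [show PySem.Int.floordiv 64 3 = ((21:Nat) : Int) from by decide,
        PySem.List.pyRange_zero_natCast]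
    have h := goA3 x y z (List.range 21) 0
    rw [Nat.cast_zero] at h
    rw [h]
    show ((A3 x y z 21 : Nat) : Int) = morton [x, y, z] 21
    rw [A3_eq_M3, morton3_cast]
  | a :: b :: c :: d :: t =>
    show interleave_bits (a :: b :: c :: d :: t) = interleave_bits_alt (a :: b :: c :: d :: t)
    rw [interleave_bits, interleave_bits_alt]
    simp only [PySem.List.len_eq, List.length_cons]
    rw [if_neg (by push_cast; omega)]
    rw [go_nop _ _ (by push_cast; omega) (by push_cast; omega) (by push_cast; omega)]
    rw [if_neg (by omega), if_neg (by omega), if_neg (by omega)]
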